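-- pv_equiv track=rewrite | github.com/MrBrantCode/unitest_baseline | mut_generate/mist_train_taco/taco_16187/solution.py | find_least_super_lucky_number
-- ===== SOURCE A (Python) =====
-- def find_least_super_lucky_number(n):
--     gh = set()
--
--     def rep(num, four, seven):
--         if num > 10000000000:
--             return
--         if four == seven:
--             gh.add(num)
--         rep(num * 10 + 4, four + 1, seven)
--         rep(num * 10 + 7, four, seven + 1)
--
--     rep(0, 0, 0)
--     gh = sorted(gh)
--
--     def bin_s(a):
--         lo = 0
--         hi = len(gh)
--         ans = 0
--         while lo <= hi:
--             mid = (lo + hi) // 2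
--             if gh[mid] >= a:
--                 ans = gh[mid]
--                 hi = mid - 1
--             else:
--                 lo = mid + 1
--         return ans
--
--     return bin_s(n)
-- ===== SOURCE B (Python) =====
-- def find_least_super_lucky_number(n):
--     # Scan balanced 4/7 numbers in increasing order (even lengths 0,2,...,10;
--     # within a length, masks in increasing order give increasing values) and
--     # return the first one >= n.
--     for length in range(0, 12, 2):
--         for mask in range(1 << length):
--             c = 0
--             m = mask
--             while m:
--                 c += m & 1
--                 m >>= 1
--             if c != length // 2:
--                 continue
--             v = 0
--             for i in range(length - 1, -1, -1):
--                 v = v * 10 + (7 if (mask >> i) & 1 else 4)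
--             if v >= n:
--                 return v
--     return None  # unreachable for n <= 7777744444
-- ===== Notes on version B (the rewrite author's own statement) =====
-- stated objective: simpler
-- what changed: A builds a set of balanced 4/7 numbers by unbounded recursion, sorts it and runs a hand-rolled binary search; B enumerates the balanced numbers directly in increasing order (even lengths 0..10, bitmasks with equal counts of 4s and 7s) and returns the first one >= n, with no set, no sort and no search.
import Mathlib
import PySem

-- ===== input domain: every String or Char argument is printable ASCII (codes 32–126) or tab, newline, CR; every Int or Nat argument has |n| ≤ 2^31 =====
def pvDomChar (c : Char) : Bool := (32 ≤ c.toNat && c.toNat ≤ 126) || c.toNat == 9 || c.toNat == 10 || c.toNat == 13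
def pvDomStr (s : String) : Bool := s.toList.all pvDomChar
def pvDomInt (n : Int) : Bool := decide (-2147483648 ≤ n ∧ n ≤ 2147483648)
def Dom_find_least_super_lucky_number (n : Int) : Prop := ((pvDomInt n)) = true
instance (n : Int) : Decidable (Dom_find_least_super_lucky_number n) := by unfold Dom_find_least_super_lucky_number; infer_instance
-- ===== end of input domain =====

-- B replaces A's recursive set-building plus hand-rolled binary search by a single ordered
-- scan of the balanced 4/7 numbers (even lengths, bitmask enumeration), returning the first
-- one ≥ n (objective: simpler).

-- ===== PORT A =====
-- rep(num, four, seven): adds `num` to the set when four == seven, recursing on num*10+4 and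
-- num*10+7 until num > 10^10.  The recursion depth is at most 12 (a 12-digit num exceeds
-- 10^10), so fuel 12 is a pure totality device: the fuel never runs out before the guard.
def repA (fuel : Nat) (num four seven : Int) (gh : PySem.Set Int) : PySem.Set Int :=
  match fuel with
  | 0 => gh
  | fuel + 1 =>
    if num > 10000000000 then gh
    else
      let gh1 := if four = seven then PySem.Set.add gh num else gh
      let gh2 := repA fuel (num * 10 + 4) (four + 1) seven gh1
      repA fuel (num * 10 + 7) four (seven + 1) gh2

-- gh = sorted(gh) after rep(0, 0, 0)
def ghA : List Int := PySem.List.sorted (repA 12 0 0 0 PySem.Set.empty) (fun x => x) false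

-- bin_s's while loop: each iteration shrinks hi - lo by at least 1, starting from len(gh),
-- so fuel len + 2 never runs out before lo > hi; gh[mid] out of range is Python's IndexError
-- (unreachable for n within Dom, where an element ≥ n always exists).
def binGo (fuel : Nat) (gh : List Int) (a lo hi ans : Int) : Int :=
  match fuel with
  | 0 => ans
  | fuel + 1 =>
    if lo ≤ hi then
      match PySem.List.pyGet? gh (PySem.Int.floordiv (lo + hi) 2) with
      | none => 0  -- IndexError in Python; unreachable on Dom
      | some v =>
        if v ≥ a then binGo fuel gh a lo (PySem.Int.floordiv (lo + hi) 2 - 1) v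
        else binGo fuel gh a (PySem.Int.floordiv (lo + hi) 2 + 1) hi ans
    else ans

def find_least_super_lucky_number (n : Int) : Int :=
  binGo (ghA.length + 2) ghA n 0 (ghA.length : Int) 0

-- ===== PORT B =====
-- the `while m: c += m & 1; m >>= 1` popcount loop; m strictly decreases, so fuel m suffices
def popcountGo (fuel m : Nat) : Nat :=
  match fuel with
  | 0 => 0
  | f + 1 => if m = 0 then 0 else (m &&& 1) + popcountGo f (m >>> 1)

def popcountB (m : Nat) : Nat := popcountGo m m

-- v = 0; for i in range(length-1, -1, -1): v = v*10 + (7 if (mask >> i) & 1 else 4)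
-- (i ranges over 0 ≤ i < length, so i.toNat is exact for the shift)
def buildDigits (mask : Nat) (L : Nat) : Int :=
  (PySem.List.pyRange ((L : Int) - 1) (-1) (-1)).foldl
    (fun v i => v * 10 + (if (mask >>> i.toNat) &&& 1 ≠ 0 then 7 else 4)) 0

-- the inner `for mask in range(1 << length)` with the early `return v`; mask increases by 1
-- each step, so fuel 2^L + 1 never runs out before the range is exhausted
def scanMasks (fuel : Nat) (n : Int) (L : Nat) (mask : Nat) : Option Int :=
  match fuel with
  | 0 => none
  | f + 1 =>
    if mask < 2 ^ L then
      if popcountB mask ≠ L / 2 then scanMasks f n L (mask + 1)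
      else if buildDigits mask L ≥ n then some (buildDigits mask L)
      else scanMasks f n L (mask + 1)
    else none

-- the outer `for length in range(0, 12, 2)` (= [0, 2, 4, 6, 8, 10])
def scanLens (n : Int) (Ls : List Nat) : Option Int :=
  match Ls with
  | [] => none
  | L :: rest =>
    match scanMasks (2 ^ L + 1) n L 0 with
    | some v => some v
    | none => scanLens n rest

-- falling off the loops Python returns None (unreachable on Dom); 0 stands in for it here
def find_least_super_lucky_number_alt (n : Int) : Int :=
  (scanLens n [0, 2, 4, 6, 8, 10]).getD 0

-- ===== PRECONDITION & SPEC =====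
def Spec_find_least_super_lucky_number (n : Int) (out : Int) : Prop := out = find_least_super_lucky_number_alt n
instance (n : Int) (out : Int) : Decidable (Spec_find_least_super_lucky_number n out) := by unfold Spec_find_least_super_lucky_number; infer_instance

-- ===== CLAIM (what is proved, stated in full; the proofs are below) =====
def Claim_equal_find_least_super_lucky_number : Prop := ∀ (n : Int), Dom_find_least_super_lucky_number n → Spec_find_least_super_lucky_number n (find_least_super_lucky_number n)

-- ===== LEMMAS AND PROOFS =====

-- B's candidates for one length, in scan order
def candList (L : Nat) : List Int :=
  ((List.range (2 ^ L)).filter (fun m => popcountB m = L / 2)).map (fun m => buildDigits m L)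

def allCands : List Int := [0, 2, 4, 6, 8, 10].flatMap candList

-- A's sorted set IS B's scan sequence, and it contains an element ≥ 2^31
set_option maxRecDepth 1000000 in
set_option maxHeartbeats 4000000 in
lemma ghA_eq_allCands : ghA = allCands ∧ (4444477777 : Int) ∈ ghA := by decide

lemma ghA_pairwise : ghA.Pairwise (· ≤ ·) :=
  PySem.List.sorted_pairwise (repA 12 0 0 0 PySem.Set.empty) (fun x => x)

-- B's inner loop is find? over the remaining filtered/mapped masks
lemma scanMasks_eq (n : Int) (L : Nat) : ∀ (fuel mask : Nat), 2 ^ L - mask < fuel →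
    scanMasks fuel n L mask =
      (((List.range' mask (2 ^ L - mask)).filter (fun m => popcountB m = L / 2)).map
        (fun m => buildDigits m L)).find? (fun v => decide (v ≥ n)) := by
  intro fuel
  induction fuel with
  | zero => intro mask h; exact absurd h (Nat.not_lt_zero _)
  | succ f ih =>
    intro mask h
    by_cases hm : mask < 2 ^ L
    · have hr : 2 ^ L - mask = (2 ^ L - (mask + 1)) + 1 := by omega
      rw [hr, List.range'_succ]
      simp only [scanMasks, hm, if_pos, List.filter_cons]
      by_cases hp : popcountB mask = L / 2
      · simp only [hp, if_pos, ite_not, List.map_cons, List.find?_cons, decide_eq_true_eq]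
        by_cases hv : buildDigits mask L ≥ n
        · simp [hv]
        · simp [hv, ih (mask + 1) (by omega)]
      · simp [hp, ih (mask + 1) (by omega)]
    · have h0 : 2 ^ L - mask = 0 := by omega
      simp [scanMasks, hm, h0]

-- the whole of B's loop nest is find? over allCands restricted to the given lengths
lemma scanLens_eq (n : Int) : ∀ (Ls : List Nat),
    scanLens n Ls = (Ls.flatMap candList).find? (fun v => decide (v ≥ n)) := by
  intro Ls
  induction Ls with
  | nil => simp [scanLens]
  | cons L rest ih =>
    have h0 : scanMasks (2 ^ L + 1) n L 0 = (candList L).find? (fun v => decide (v ≥ n)) := by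
      have := scanMasks_eq n L (2 ^ L + 1) 0 (Nat.lt_succ_of_le (Nat.sub_le _ _))
      simpa [candList, List.range_eq_range'] using this
    simp only [scanLens, h0, List.flatMap_cons, List.find?_append, ih]
    cases (candList L).find? (fun v => decide (v ≥ n)) <;> simp

-- A's binary search returns gh[k], the first element ≥ a, whenever the invariant holds
lemma binGo_eq (gh : List Int) (a : Int) (k : Nat)
    (hpw : gh.Pairwise (· ≤ ·))
    (hk : k < gh.length)
    (hka : a ≤ gh[k])
    (hmin : ∀ i (hi : i < gh.length), i < k → gh[i] < a) :
    ∀ (fuel : Nat) (lo hi ans : Int), 0 ≤ lo → lo ≤ (k : Int) → (k : Int) ≤ hi + 1 →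
      hi ≤ (gh.length : Int) → hi - lo + 1 < (fuel : Int) →
      ((k : Int) = hi + 1 → ans = gh[k]) →
      binGo fuel gh a lo hi ans = gh[k] := by
  intro fuel
  induction fuel with
  | zero => intro lo hi ans h0 hlk hkh hhl hf hend; omega
  | succ f ih =>
    intro lo hi ans h0 hlk hkh hhl hf hend
    by_cases hlh : lo ≤ hi
    · obtain ⟨hm1, hm2⟩ := PySem.Int.floordiv_two_mid_bounds hlh
      have hmlen : PySem.Int.floordiv (lo + hi) 2 < (gh.length : Int) := by
        by_contra hcon
        have h2 : (gh.length : Int) ≤ PySem.Int.floordiv (lo + hi) 2 := by omega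
        rw [PySem.Int.le_floordiv_iff_mul_le (by omega)] at h2
        omega
      have hm0 : (0 : Int) ≤ PySem.Int.floordiv (lo + hi) 2 := by omega
      have hget := PySem.List.pyGet?_eq_some_getElem gh hm0 hmlen
      simp only [binGo, if_pos hlh, hget]
      by_cases hv : gh[(PySem.Int.floordiv (lo + hi) 2).toNat] ≥ a
      · have hkm : (k : Int) ≤ PySem.Int.floordiv (lo + hi) 2 := by
          by_contra hcon
          have hlt : (PySem.Int.floordiv (lo + hi) 2).toNat < k := by omega
          exact absurd (hmin _ (by omega) hlt) (by omega)
        rw [if_pos hv]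
        apply ih lo (PySem.Int.floordiv (lo + hi) 2 - 1) _ h0 hlk (by omega) (by omega) (by omega)
        intro hkm1
        have hkeq : k = (PySem.Int.floordiv (lo + hi) 2).toNat := by omega
        simp [hkeq]
      · have hmk : PySem.Int.floordiv (lo + hi) 2 < (k : Int) := by
          by_contra hcon
          rcases Nat.lt_or_ge k (PySem.Int.floordiv (lo + hi) 2).toNat with hlt | hge
          · have := (List.pairwise_iff_getElem.mp hpw) k _ hk (by omega) hlt
            omega
          · have hkeq : k = (PySem.Int.floordiv (lo + hi) 2).toNat := by omega
            have hgel : gh[k] = gh[(PySem.Int.floordiv (lo + hi) 2).toNat] := by simp [hkeq]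
            rw [hgel] at hka
            omega
        rw [if_neg hv]
        exact ih (PySem.Int.floordiv (lo + hi) 2 + 1) hi ans (by omega) (by omega) hkh hhl (by omega) hend
    · have hkeq : (k : Int) = hi + 1 := by omega
      simp only [binGo, if_neg hlh]
      exact hend hkeq

-- ===== VERDICT (by name: the statement is the Claim_ definition above) =====
-- on a sorted list containing an element ≥ a, A's search equals first-match
lemma binSearch_eq_find (g : List Int) (a : Int) (hpw : g.Pairwise (· ≤ ·))
    (hex : ∃ x ∈ g, decide (x ≥ a) = true) :
    binGo (g.length + 2) g a 0 (g.length : Int) 0 =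
      (g.find? (fun v => decide (v ≥ a))).getD 0 := by
  set p : Int → Bool := fun v => decide (v ≥ a) with hp
  set k := g.findIdx p with hkdef
  have hk : k < g.length := List.findIdx_lt_length_of_exists hex
  have hpk : p g[k] = true := List.findIdx_getElem
  have hka : a ≤ g[k] := by simpa [hp] using hpk
  have hmin : ∀ i (hi : i < g.length), i < k → g[i] < a := by
    intro i hi hik
    have hpf : p (g[i]) = false := List.not_of_lt_findIdx hik
    simp only [hp, decide_eq_false_iff_not] at hpf
    omega
  have hA : binGo (g.length + 2) g a 0 (g.length : Int) 0 = g[k] := by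
    apply binGo_eq g a k hpw hk hka hmin (g.length + 2) 0 (g.length : Int) 0
      (by omega) (by omega) (by omega) (by omega) (by push_cast; omega)
    intro hcon; omega
  rw [hA, List.find?_eq_getElem?_findIdx, ← hkdef, List.getElem?_eq_getElem hk]
  rfl

theorem find_least_super_lucky_number_spec : Claim_equal_find_least_super_lucky_number := by
  intro n hdom
  have hn : n ≤ 2147483648 := by
    unfold Dom_find_least_super_lucky_number pvDomInt at hdom
    simpa using (of_decide_eq_true hdom).2
  obtain ⟨heq, hmem⟩ := ghA_eq_allCands
  have hex : ∃ x ∈ ghA, decide (x ≥ n) = true := ⟨4444477777, hmem, by simp; omega⟩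
  unfold Spec_find_least_super_lucky_number find_least_super_lucky_number
    find_least_super_lucky_number_alt
  rw [scanLens_eq, binSearch_eq_find ghA n ghA_pairwise hex]
  unfold allCands at heq
  rw [heq]
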